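-- pv_equiv track=rewrite | github.com/ss-getcoribear/pythonProject | lxpy-master/lxpy/encoding.py | b36encode
-- ===== SOURCE A (Python) =====
-- def b36encode(num):
--     alpha = '0123456789abcdefghijklmnopqrstuvwxyz'
--     if not isinstance(num, int):
--         raise TypeError('num must be an integer')
--     if num < 0:
--         return '-' + b36encode(-num)
--     val = ''
--     while num != 0:
--         num, idx = divmod(num, len(alpha))
--         val = alpha[idx] + val
--     return val or '0'
-- ===== SOURCE B (Python) =====
-- def b36encode(num):
--     alpha = '0123456789abcdefghijklmnopqrstuvwxyz'
--     if not isinstance(num, int):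
--         raise TypeError('num must be an integer')
--     if num < 0:
--         return '-' + b36encode(-num)
--     if num == 0:
--         return '0'
--     p = 1
--     while p * 36 <= num:
--         p *= 36
--     out = []
--     while p > 0:
--         out.append(alpha[num // p])
--         num %= p
--         p //= 36
--     return ''.join(out)
-- ===== Notes on version B (the rewrite author's own statement) =====
-- stated objective: alternative
-- what changed: Replaces the LSB-first while/divmod loop that prepends each digit to a string with an MSB-first algorithm: first find the largest power of 36 not exceeding num, then emit digits left-to-right by dividing by that shrinking power, joining an appended list once at the end.
import Mathlib
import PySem

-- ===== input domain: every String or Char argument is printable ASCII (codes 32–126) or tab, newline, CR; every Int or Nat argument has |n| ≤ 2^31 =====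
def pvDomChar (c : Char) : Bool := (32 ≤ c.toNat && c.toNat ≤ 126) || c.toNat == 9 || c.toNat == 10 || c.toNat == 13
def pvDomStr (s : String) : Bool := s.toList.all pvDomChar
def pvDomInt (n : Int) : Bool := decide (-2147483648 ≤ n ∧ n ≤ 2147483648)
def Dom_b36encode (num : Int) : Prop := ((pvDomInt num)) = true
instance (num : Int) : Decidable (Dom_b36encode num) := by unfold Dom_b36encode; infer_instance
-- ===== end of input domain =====

-- B replaces A's LSB-first divmod/prepend loop with an MSB-first algorithm (largest power of 36, then divide by the shrinking power, appending digits left-to-right); alternative algorithm, same cost.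


-- ===== PORT A =====
-- string values are carried as List Char and wrapped with String.ofList at the end (exact; PySem strings are defined on List Char)
def pvAlpha : List Char := "0123456789abcdefghijklmnopqrstuvwxyz".toList

-- A's while loop: num, idx = divmod(num, 36); val = alpha[idx] + val  (num ≥ 0 in the loop; idx = n % 36 < 36 so getD is exact)
def pvALoop (n : Nat) (val : List Char) : List Char :=
  if h : n = 0 then val
  else pvALoop (n / 36) (pvAlpha.getD (n % 36) ' ' :: val)
  termination_by n
  decreasing_by exact Nat.div_lt_self (Nat.pos_of_ne_zero h) (by norm_num)

-- A on a nonnegative argument: the loop, then `val or '0'`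
def pvANN (m : Int) : List Char :=
  let v := pvALoop m.toNat []
  if v = [] then ['0'] else v

def b36encode (num : Int) : String :=
  String.ofList (if num < 0 then '-' :: pvANN (-num) else pvANN num)

-- ===== PORT B =====
-- first while loop of B: p = 1; while p * 36 <= num: p *= 36   (p > 0 is a loop invariant, carried as a hypothesis for termination)
def pvFindPow (p n : Nat) (hp : 0 < p) : Nat :=
  if h : p * 36 ≤ n then pvFindPow (p * 36) n (by omega) else p
  termination_by n - p
  decreasing_by omega

-- second while loop of B: while p > 0: out.append(alpha[num // p]); num %= p; p //= 36
-- (alpha[num // p] is in range on every actual iteration; getD is exact there)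
def pvMsbLoop (n p : Nat) : List Char :=
  if h : p = 0 then []
  else pvAlpha.getD (n / p) ' ' :: pvMsbLoop (n % p) (p / 36)
  termination_by p
  decreasing_by exact Nat.div_lt_self (Nat.pos_of_ne_zero h) (by norm_num)

-- B on a nonnegative argument
def pvBNN (m : Int) : List Char :=
  if m = 0 then ['0'] else pvMsbLoop m.toNat (pvFindPow 1 m.toNat Nat.one_pos)

def b36encode_alt (num : Int) : String :=
  String.ofList (if num < 0 then '-' :: pvBNN (-num) else pvBNN num)

-- ===== PRECONDITION & SPEC =====
def Spec_b36encode (num : Int) (out : String) : Prop := out = b36encode_alt num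
instance (num : Int) (out : String) : Decidable (Spec_b36encode num out) := by unfold Spec_b36encode; infer_instance

-- ===== CLAIM (what is proved, stated in full; the proofs are below) =====
def Claim_equal_b36encode : Prop := ∀ (num : Int), Dom_b36encode num → Spec_b36encode num (b36encode num)

-- ===== LEMMAS AND PROOFS =====
-- proof helper: the base-36 digit string of n, MSB-first, built by recursion on the quotient
def pvEnc (n : Nat) : List Char :=
  if _h : n = 0 then []
  else pvEnc (n / 36) ++ [pvAlpha.getD (n % 36) ' ']
  termination_by n
  decreasing_by exact Nat.div_lt_self (Nat.pos_of_ne_zero _h) (by norm_num)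

-- proof helper: the last j base-36 digits of n, MSB-first, zero-padded to length j
def pvPad : Nat → Nat → List Char
  | 0, _ => []
  | j + 1, n => pvPad j (n / 36) ++ [pvAlpha.getD (n % 36) ' ']

theorem pvALoop_eq (n : Nat) : ∀ val, pvALoop n val = pvEnc n ++ val := by
  induction n using Nat.strong_induction_on with
  | _ n ih =>
    intro val
    unfold pvALoop pvEnc
    by_cases h : n = 0
    · simp [h]
    · simp only [h, dite_false]
      rw [ih (n / 36) (Nat.div_lt_self (Nat.pos_of_ne_zero h) (by norm_num)), List.append_assoc]
      rfl

theorem pvEnc_ne_empty (n : Nat) (h : n ≠ 0) : pvEnc n ≠ [] := by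
  unfold pvEnc; simp [h]

theorem pvPad_head (j : Nat) : ∀ n, n < 36 ^ (j + 1) →
    pvPad (j + 1) n = pvAlpha.getD (n / 36 ^ j) ' ' :: pvPad j (n % 36 ^ j) := by
  induction j with
  | zero =>
    intro n h
    simp [pvPad, Nat.mod_eq_of_lt (by simpa using h)]
  | succ j ih =>
    intro n h
    have hdiv : n / 36 < 36 ^ (j + 1) := by
      apply Nat.div_lt_of_lt_mul
      calc n < 36 ^ (j + 2) := h
        _ = 36 * 36 ^ (j + 1) := by ring
    have e1 : n / 36 / 36 ^ j = n / 36 ^ (j + 1) := by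
      rw [Nat.div_div_eq_div_mul]; congr 1; ring
    have e2 : n / 36 % 36 ^ j = n % 36 ^ (j + 1) / 36 := by
      rw [← Nat.mod_mul_right_div_self n 36 (36 ^ j)]; congr 2; ring
    have e3 : n % 36 ^ (j + 1) % 36 = n % 36 :=
      Nat.mod_mod_of_dvd n ⟨36 ^ j, by ring⟩
    show pvPad (j + 1) (n / 36) ++ [pvAlpha.getD (n % 36) ' '] = _
    rw [ih (n / 36) hdiv, e1, e2]
    show _ = pvAlpha.getD (n / 36 ^ (j + 1)) ' ' :: (pvPad j (n % 36 ^ (j + 1) / 36) ++ [pvAlpha.getD (n % 36 ^ (j + 1) % 36) ' '])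
    rw [e3]; rfl

theorem pvEnc_eq_pad (k : Nat) : ∀ n, 36 ^ k ≤ n → n < 36 ^ (k + 1) →
    pvEnc n = pvPad (k + 1) n := by
  induction k with
  | zero =>
    intro n h1 h2
    have hn : n ≠ 0 := by simpa using Nat.one_le_iff_ne_zero.mp (by simpa using h1)
    unfold pvEnc
    simp only [hn, dite_false]
    have : n / 36 = 0 := Nat.div_eq_of_lt (by simpa using h2)
    rw [this]
    simp [pvEnc, pvPad]
  | succ k ih =>
    intro n h1 h2
    have hpow : (0 : Nat) < 36 ^ (k + 1) := by positivity
    have hn : n ≠ 0 := by omega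
    have hle : 36 ^ k ≤ n / 36 := by
      rw [Nat.le_div_iff_mul_le (by norm_num)]
      calc 36 ^ k * 36 = 36 ^ (k + 1) := by ring
        _ ≤ n := h1
    have hlt : n / 36 < 36 ^ (k + 1) := by
      apply Nat.div_lt_of_lt_mul
      calc n < 36 ^ (k + 2) := h2
        _ = 36 * 36 ^ (k + 1) := by ring
    unfold pvEnc
    simp only [hn, dite_false]
    rw [ih (n / 36) hle hlt]
    rfl

theorem pvMsbLoop_pow (k : Nat) : ∀ n, n < 36 ^ (k + 1) →
    pvMsbLoop n (36 ^ k) = pvPad (k + 1) n := by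
  induction k with
  | zero =>
    intro n h
    unfold pvMsbLoop
    simp [pvMsbLoop, pvPad, Nat.mod_eq_of_lt (by simpa using h)]
  | succ k ih =>
    intro n h
    unfold pvMsbLoop
    have hp : (36 : Nat) ^ (k + 1) ≠ 0 := by positivity
    simp only [hp, dite_false]
    have e : 36 ^ (k + 1) / 36 = 36 ^ k := by
      rw [pow_succ, Nat.mul_div_cancel _ (by norm_num)]
    rw [e, ih (n % 36 ^ (k + 1)) (Nat.mod_lt _ (Nat.pos_of_ne_zero hp)),
        pvPad_head (k + 1) n h]

theorem pvFindPow_spec (n : Nat) : ∀ d p (hp : 0 < p), n - p ≤ d → ∀ j, p = 36 ^ j → p ≤ n →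
    ∃ k, pvFindPow p n hp = 36 ^ k ∧ 36 ^ k ≤ n ∧ n < 36 ^ (k + 1) := by
  intro d
  induction d with
  | zero =>
    intro p hp hd j hj hpn
    unfold pvFindPow
    have h36 : ¬ p * 36 ≤ n := by omega
    simp only [h36, dite_false]
    exact ⟨j, hj, hj ▸ hpn, by rw [pow_succ, ← hj]; omega⟩
  | succ d ih =>
    intro p hp hd j hj hpn
    unfold pvFindPow
    by_cases h36 : p * 36 ≤ n
    · simp only [h36, dite_true]
      exact ih (p * 36) (by omega) (by omega) (j + 1) (by rw [pow_succ, ← hj]) h36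
    · simp only [h36, dite_false]
      exact ⟨j, hj, hj ▸ hpn, by rw [pow_succ, ← hj]; omega⟩

theorem pvNN_eq (m : Int) (hnn : 0 ≤ m) : pvANN m = pvBNN m := by
  unfold pvANN pvBNN
  rw [pvALoop_eq, List.append_nil]
  by_cases h : m = 0
  · simp [h, pvEnc]
  · have hn : m.toNat ≠ 0 := by omega
    simp only [h, if_false]
    obtain ⟨k, hk, hk1, hk2⟩ := pvFindPow_spec m.toNat (m.toNat - 1) 1 Nat.one_pos (by omega) 0
      (by norm_num) (by omega)
    rw [hk, pvMsbLoop_pow k m.toNat hk2, ← pvEnc_eq_pad k m.toNat hk1 hk2]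
    simp [pvEnc_ne_empty m.toNat hn]

-- ===== VERDICT (by name: the statement is the Claim_ definition above) =====
theorem b36encode_spec : Claim_equal_b36encode := by
  intro num _
  unfold Spec_b36encode b36encode b36encode_alt
  by_cases h : num < 0
  · simp [h, pvNN_eq (-num) (by omega)]
  · simp [h, pvNN_eq num (by omega)]
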